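-- pv_equiv track=rewrite | github.com/Kaleemullah-Younas/moodfloo | backend/core/metrics_processor.py | calculate_emotion_shifts
-- ===== SOURCE A (Python) =====
-- from typing import Dict, List
--
-- def calculate_emotion_shifts(categories: List[str]) -> int:
--     """Count number of emotion category changes"""
--     if len(categories) < 2:
--         return 0
--
--     shifts = 0
--     for i in range(1, len(categories)):
--         if categories[i] != categories[i-1]:
--             shifts += 1
--
--     return shifts
-- ===== SOURCE B (Python) =====
-- def calculate_emotion_shifts(categories):
--     """Count number of emotion category changes.
--
--     Collapses the list into maximal runs of consecutive equal categories
--     (groupby-style run-skipping scan) and returns max(#runs - 1, 0).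
--     """
--     n = len(categories)
--     groups = 0
--     i = 0
--     while i < n:
--         v = categories[i]
--         i += 1
--         while i < n and categories[i] == v:
--             i += 1
--         groups += 1
--     return max(groups - 1, 0)
-- ===== Notes on version B (the rewrite author's own statement) =====
-- stated objective: alternative
-- what changed: B collapses the input into maximal runs of consecutive equal categories with an index-skipping two-level loop and returns max(#runs - 1, 0), instead of A's single loop that increments a counter on every adjacent mismatch.
import Mathlib
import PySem

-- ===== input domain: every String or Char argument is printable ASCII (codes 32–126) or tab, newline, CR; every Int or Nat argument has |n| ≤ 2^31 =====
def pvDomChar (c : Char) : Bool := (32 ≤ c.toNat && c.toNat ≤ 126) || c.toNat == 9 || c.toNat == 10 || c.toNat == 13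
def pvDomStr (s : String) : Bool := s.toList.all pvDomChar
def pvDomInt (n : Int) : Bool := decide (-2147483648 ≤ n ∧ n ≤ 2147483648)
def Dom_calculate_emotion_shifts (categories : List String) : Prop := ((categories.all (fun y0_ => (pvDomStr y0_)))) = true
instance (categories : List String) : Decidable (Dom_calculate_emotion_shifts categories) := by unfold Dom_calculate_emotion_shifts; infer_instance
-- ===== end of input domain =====

-- B collapses the input into maximal runs of equal consecutive categories (groupby-style
-- skip loop) and returns max(runs - 1, 0); A counts adjacent mismatches directly.

-- ===== PORT A =====
-- literal port of A: guard len < 2, then a loop over range(1, len) comparing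
-- categories[i] with categories[i-1] (indices are always in range, so pyGetD is exact).
def calculate_emotion_shifts (categories : List String) : Int :=
  if (categories.length : Int) < 2 then 0
  else
    (PySem.List.pyRange 1 (categories.length : Int) 1).foldl
      (fun shifts i =>
        if PySem.List.pyGetD categories i "" ≠ PySem.List.pyGetD categories (i - 1) "" then
          shifts + 1
        else shifts)
      0

-- ===== PORT B =====
-- inner while loop of B: starting at i, skip indices whose category equals v
-- (the nested if mirrors Python's short-circuiting 'i < n and categories[i] == v').
def pvSkipRun (categories : List String) (v : String) (i : Nat) : Nat :=
  if h : i < categories.length then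
    if categories[i]'h == v then pvSkipRun categories v (i + 1) else i
  else i
termination_by categories.length - i
decreasing_by omega

-- needed by pvRunsFrom's termination: the inner loop never moves the index backwards.
theorem pvSkipRun_le (categories : List String) (v : String) (i : Nat) :
    i ≤ pvSkipRun categories v i := by
  fun_induction pvSkipRun with
  | case1 i h hv ih => omega
  | case2 i h hv => omega
  | case3 i h => omega

-- outer while loop of B: one iteration per maximal run, counting the runs.
def pvRunsFrom (categories : List String) (i : Nat) (groups : Int) : Int :=
  if h : i < categories.length then
    pvRunsFrom categories (pvSkipRun categories (categories[i]'h) (i + 1)) (groups + 1)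
  else groups
termination_by categories.length - i
decreasing_by
  have := pvSkipRun_le categories (categories[i]'h) (i + 1)
  omega

def calculate_emotion_shifts_alt (categories : List String) : Int :=
  max (pvRunsFrom categories 0 0 - 1) 0

-- ===== PRECONDITION & SPEC =====
def Spec_calculate_emotion_shifts (categories : List String) (out : Int) : Prop := out = calculate_emotion_shifts_alt categories
instance (categories : List String) (out : Int) : Decidable (Spec_calculate_emotion_shifts categories out) := by unfold Spec_calculate_emotion_shifts; infer_instance

-- ===== CLAIM (what is proved, stated in full; the proofs are below) =====
def Claim_equal_calculate_emotion_shifts : Prop := ∀ (categories : List String), Dom_calculate_emotion_shifts categories → Spec_calculate_emotion_shifts categories (calculate_emotion_shifts categories)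

-- ===== LEMMAS AND PROOFS =====

-- number of adjacent mismatches (reference characterisation of A's loop)
def pvCountAdj : List String → Int
  | a :: b :: t => (if b ≠ a then 1 else 0) + pvCountAdj (b :: t)
  | _ => 0

-- number of maximal runs (reference characterisation of B's loops)
def pvRuns : List String → Int
  | [] => 0
  | x :: xs => 1 + pvRuns (xs.dropWhile (· == x))
termination_by l => l.length
decreasing_by
  have := List.length_dropWhile_le (· == x) xs
  simp; omega

theorem pvRuns_nil : pvRuns [] = 0 := by
  rw [pvRuns.eq_def]

theorem pvRuns_cons (x : String) (xs : List String) :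
    pvRuns (x :: xs) = 1 + pvRuns (xs.dropWhile (· == x)) := by
  rw [pvRuns.eq_def]

theorem pvRuns_nonneg (l : List String) : 0 ≤ pvRuns l := by
  fun_induction pvRuns with
  | case1 => omega
  | case2 x xs ih => omega

theorem pvCountAdj_eq_runs_sub_one (x : String) (xs : List String) :
    pvCountAdj (x :: xs) = pvRuns (x :: xs) - 1 := by
  induction xs generalizing x with
  | nil => simp [pvCountAdj, pvRuns_cons, pvRuns_nil]
  | cons y t ih =>
    by_cases hxy : y = x
    · subst hxy
      have h1 : pvCountAdj (y :: y :: t) = pvCountAdj (y :: t) := by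
        simp [pvCountAdj]
      have h2 : pvRuns (y :: y :: t) = pvRuns (y :: t) := by
        rw [pvRuns_cons, pvRuns_cons y t, List.dropWhile_cons_of_pos (by simp)]
      rw [h1, h2, ih]
    · have h1 : pvCountAdj (x :: y :: t) = 1 + pvCountAdj (y :: t) := by
        simp [pvCountAdj, hxy]
      have h2 : pvRuns (x :: y :: t) = 1 + pvRuns (y :: t) := by
        rw [pvRuns_cons, List.dropWhile_cons_of_neg (by simp [hxy])]
      rw [h1, h2, ih]
      omega

-- A's loop from index k computes pvCountAdj of the suffix starting at k-1.
theorem pvA_loop (l : List String) (k : Nat) (hk : 1 ≤ k) (acc : Int) :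
    (PySem.List.pyRange (k : Int) (l.length : Int) 1).foldl
      (fun shifts i =>
        if PySem.List.pyGetD l i "" ≠ PySem.List.pyGetD l (i - 1) "" then shifts + 1 else shifts)
      acc = acc + pvCountAdj (l.drop (k - 1)) := by
  by_cases h : k < l.length
  · rw [PySem.List.pyRange_one_cons (by exact_mod_cast h)]
    simp only [List.foldl_cons]
    have hk1 : k - 1 < l.length := by omega
    have hget : PySem.List.pyGetD l (k : Int) "" = l[k]'h := by
      rw [PySem.List.pyGetD_natCast]; simp [h]
    have hget' : PySem.List.pyGetD l ((k : Int) - 1) "" = l[k-1]'hk1 := by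
      have e : (k : Int) - 1 = ((k - 1 : Nat) : Int) := by omega
      rw [e, PySem.List.pyGetD_natCast]; simp [hk1]
    have hcons : (k : Int) + 1 = ((k + 1 : Nat) : Int) := by omega
    have hdrop2 : l.drop k = l[k]'h :: l.drop (k + 1) := List.drop_eq_getElem_cons h
    have hdrop1 : l.drop (k - 1) = l[k-1]'hk1 :: l.drop k := by
      have e : k - 1 + 1 = k := by omega
      rw [List.drop_eq_getElem_cons hk1, e]
    rw [hget, hget', hcons, pvA_loop l (k + 1) (by omega) _]
    simp only [Nat.add_sub_cancel]
    rw [hdrop1, hdrop2]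
    have hsplit : pvCountAdj (l[k-1]'hk1 :: l[k]'h :: l.drop (k + 1))
        = (if l[k]'h ≠ l[k-1]'hk1 then 1 else 0) + pvCountAdj (l[k]'h :: l.drop (k + 1)) := by
      simp [pvCountAdj]
    rw [hsplit]
    split <;> omega
  · rw [PySem.List.pyRange_one_eq_nil (by exact_mod_cast Nat.le_of_not_lt h)]
    have hle : l.length ≤ k := Nat.le_of_not_lt h
    rcases hd : l.drop (k - 1) with _ | ⟨a, rest⟩
    · simp [pvCountAdj]
    · have hlen : (l.drop (k - 1)).length ≤ 1 := by
        rw [List.length_drop]; omega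
      rw [hd] at hlen
      simp at hlen
      subst hlen
      simp [pvCountAdj]
termination_by l.length - k

-- the inner loop lands exactly past the maximal run of v starting at i.
theorem pvSkipRun_eq (l : List String) (v : String) (i : Nat) :
    pvSkipRun l v i = i + ((l.drop i).takeWhile (· == v)).length := by
  fun_induction pvSkipRun with
  | case1 i h hv ih =>
    rw [ih, List.drop_eq_getElem_cons h,
      List.takeWhile_cons_of_pos (p := (· == v)) (l := l.drop (i + 1)) (a := l[i]'h) hv]
    rw [List.length_cons]
    omega
  | case2 i h hv =>
    rw [List.drop_eq_getElem_cons h,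
      List.takeWhile_cons_of_neg (p := (· == v)) (l := l.drop (i + 1)) (a := l[i]'h)
        (by simpa using hv)]
    rw [List.length_nil]
    omega
  | case3 i h =>
    rw [List.drop_eq_nil_of_le (by omega)]
    simp

-- the outer loop counts the runs of the suffix starting at i.
theorem pvRunsFrom_eq (l : List String) (i : Nat) (g : Int) :
    pvRunsFrom l i g = g + pvRuns (l.drop i) := by
  fun_induction pvRunsFrom with
  | case1 i g h ih =>
    rw [ih, pvSkipRun_eq]
    have hdrop : l.drop i = l[i]'h :: l.drop (i + 1) := List.drop_eq_getElem_cons h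
    rw [hdrop, pvRuns_cons]
    have hdw : l.drop (i + 1 + ((l.drop (i + 1)).takeWhile (· == l[i]'h)).length)
        = (l.drop (i + 1)).dropWhile (· == l[i]'h) := by
      rw [← List.drop_drop]
      have hsplit := List.drop_left (l₁ := (l.drop (i + 1)).takeWhile (· == l[i]'h))
        (l₂ := (l.drop (i + 1)).dropWhile (· == l[i]'h))
      rw [List.takeWhile_append_dropWhile] at hsplit
      exact hsplit
    rw [hdw]; ring
  | case2 i g h =>
    rw [List.drop_eq_nil_of_le (by omega)]
    simp [pvRuns_nil]

-- ===== VERDICT (by name: the statement is the Claim_ definition above) =====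
theorem calculate_emotion_shifts_spec : Claim_equal_calculate_emotion_shifts := by
  intro categories _
  unfold Spec_calculate_emotion_shifts calculate_emotion_shifts calculate_emotion_shifts_alt
  rw [pvRunsFrom_eq]
  simp only [List.drop_zero, Int.zero_add]
  rcases categories with _ | ⟨x, xs⟩
  · simp [pvRuns_nil]
  · have hruns : 1 ≤ pvRuns (x :: xs) := by
      rw [pvRuns_cons]
      have := pvRuns_nonneg (xs.dropWhile (· == x))
      omega
    by_cases h : ((x :: xs).length : Int) < 2
    · have hx : xs = [] := by
        rw [List.length_cons] at h
        push_cast at h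
        exact List.eq_nil_of_length_eq_zero (by omega)
      subst hx
      simp [pvRuns_cons, pvRuns_nil]
    · rw [if_neg h]
      have hA := pvA_loop (x :: xs) 1 (le_refl 1) 0
      simp only [Nat.cast_one, Nat.sub_self, List.drop_zero] at hA
      have h1 : (0 : Int) ≤ pvRuns (x :: xs) - 1 := by omega
      have h0 : max (pvRuns (x :: xs) - 1) 0 = pvRuns (x :: xs) - 1 := max_eq_left h1
      rw [hA, pvCountAdj_eq_runs_sub_one, h0]
      omega
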